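-- pv_equiv track=rewrite | github.com/ernijsansons/Enterprise-Agent- | src/providers/auth_manager.py | _comment_out_api_key
-- ===== SOURCE A (Python) =====
-- def _comment_out_api_key(content: str) -> str:
--     """Comment out ANTHROPIC_API_KEY lines in env file content."""
--     lines = content.split("\n")
--     modified_lines = []
--
--     for line in lines:
--         stripped = line.strip()
--         if stripped.startswith("ANTHROPIC_API_KEY=") and not stripped.startswith(
--             "#"
--         ):
--             # Comment out the line
--             modified_lines.append(
--                 f"# {line}  # Disabled for Claude Code subscription mode"
--             )
--         else:
--             modified_lines.append(line)
--
--     return "\n".join(modified_lines)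
-- ===== SOURCE B (Python) =====
-- def _comment_out_api_key(content: str) -> str:
--     """Comment out ANTHROPIC_API_KEY lines in env file content."""
--     key = "ANTHROPIC_API_KEY="
--     pieces = []
--     last = 0
--     pos = content.find(key)
--     while pos != -1:
--         # line containing this occurrence of the key
--         start = content.rfind("\n", 0, pos) + 1
--         end = content.find("\n", pos)
--         if end == -1:
--             end = len(content)
--         line = content[start:end]
--         # copy everything before this line verbatim, then emit the line
--         pieces.append(content[last:start])
--         if line.lstrip().startswith(key):
--             pieces.append("# " + line + "  # Disabled for Claude Code subscription mode")
--         else: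
--             pieces.append(line)
--         last = end
--         pos = content.find(key, end)
--     pieces.append(content[last:])
--     return "".join(pieces)
-- ===== Notes on version B (the rewrite author's own statement) =====
-- stated objective: alternative
-- what changed: A examines every line: it splits the whole content on newlines, strips and tests each line and rejoins; B never enumerates lines: it jumps between occurrences of the key prefix with str.find, bulk-copies all text between occurrences verbatim, and only for the line around each occurrence (recovered with rfind/find of the surrounding newlines) tests and rewrites it.
import Mathlib
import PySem

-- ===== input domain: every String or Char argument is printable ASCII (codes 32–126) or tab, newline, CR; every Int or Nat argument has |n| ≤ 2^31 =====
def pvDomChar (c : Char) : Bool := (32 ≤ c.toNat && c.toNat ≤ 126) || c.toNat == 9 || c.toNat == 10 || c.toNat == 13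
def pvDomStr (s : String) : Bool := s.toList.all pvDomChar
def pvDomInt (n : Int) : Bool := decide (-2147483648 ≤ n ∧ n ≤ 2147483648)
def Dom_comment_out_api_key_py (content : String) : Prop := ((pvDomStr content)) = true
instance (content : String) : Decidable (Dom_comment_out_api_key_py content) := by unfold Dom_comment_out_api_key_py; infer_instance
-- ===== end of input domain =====

-- B replaces A's line enumeration (split every line, strip and test each, rejoin) by an
-- occurrence-driven patcher: it jumps between occurrences of the key with find, copies the
-- text in between verbatim, and rewrites only the line containing each occurrence
-- (objective: alternative, same asymptotic cost).

-- ===== PORT A =====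
-- Literal transliteration of A at the List Char level (PySem.Chars are the definitions behind PySem.Str).
def comment_out_api_key_py (content : String) : String :=
  -- lines = content.split("\n")
  let lines := PySem.Chars.splitOn content.toList "\n".toList
  -- for line in lines: … appending to modified_lines
  let modified := lines.foldl (fun acc line =>
    let stripped := PySem.Chars.strip line
    if PySem.Chars.startswith stripped "ANTHROPIC_API_KEY=".toList
        && !(PySem.Chars.startswith stripped "#".toList) then
      acc ++ ["# ".toList ++ line ++ "  # Disabled for Claude Code subscription mode".toList]
    else
      acc ++ [line]) ([] : List (List Char))
  -- "\n".join(modified_lines)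
  String.ofList (PySem.Chars.join "\n".toList modified)

-- ===== PORT B =====
def pvKeyL : List Char := "ANTHROPIC_API_KEY=".toList
def pvSufL : List Char := "  # Disabled for Claude Code subscription mode".toList

-- content.find(sub, p): first index ≥ p at which sub occurs (none = -1); scan of the suffix.
def pvFindAux (sub : List Char) : List Char → Option Nat
  | [] => if sub.isPrefixOf ([] : List Char) then some 0 else none
  | c :: t => if sub.isPrefixOf (c :: t) then some 0 else (pvFindAux sub t).map (· + 1)

def pvFind (cs sub : List Char) (p : Nat) : Option Nat :=
  (pvFindAux sub (cs.drop p)).map (· + p)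

-- content.rfind("\n", 0, pos) + 1, i.e. the start of the line containing index pos:
-- pos minus the run of non-newline characters immediately before pos (exact for in-range pos).
def pvLineStart (cs : List Char) (pos : Nat) : Nat :=
  pos - (((cs.take pos).reverse.takeWhile (· != '\n')).length)

-- end = content.find("\n", pos); if end == -1: end = len(content)
def pvNlEnd (cs : List Char) (pos : Nat) : Nat :=
  match pvFind cs ['\n'] pos with
  | none => cs.length
  | some x => x

-- Facts about find that the loop's termination needs (cited by decreasing_by).
theorem pvFindAux_some {sub : List Char} : ∀ {l : List Char} {i : Nat},
    pvFindAux sub l = some i →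
    sub.isPrefixOf (l.drop i) = true ∧ ∀ j, j < i → sub.isPrefixOf (l.drop j) = false := by
  intro l
  induction l with
  | nil =>
    intro i h
    unfold pvFindAux at h
    split at h
    · rename_i hp; cases h; exact ⟨by simpa only [List.drop_zero] using hp, by intro j hj; omega⟩
    · cases h
  | cons c t ih =>
    intro i h
    unfold pvFindAux at h
    split at h
    · rename_i hp; cases h; exact ⟨by simpa only [List.drop_zero] using hp, by intro j hj; omega⟩
    · rename_i hnp
      rcases Option.map_eq_some_iff.mp h with ⟨i', hi', rfl⟩
      obtain ⟨h1, h2⟩ := ih hi'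
      refine ⟨by simpa using h1, ?_⟩
      intro j hj
      match j with
      | 0 => simpa using Bool.eq_false_iff.mpr hnp
      | j + 1 => simpa using h2 j (by omega)

theorem pvFind_some {cs sub : List Char} {p pos : Nat} (h : pvFind cs sub p = some pos) :
    p ≤ pos ∧ sub.isPrefixOf (cs.drop pos) = true ∧
      ∀ j, p ≤ j → j < pos → sub.isPrefixOf (cs.drop j) = false := by
  rcases Option.map_eq_some_iff.mp h with ⟨i, hi, rfl⟩
  obtain ⟨h1, h2⟩ := pvFindAux_some hi
  rw [List.drop_drop] at h1
  refine ⟨by omega, by rw [show i + p = p + i by omega]; exact h1, ?_⟩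
  intro j hj1 hj2
  have := h2 (j - p) (by omega)
  rw [List.drop_drop, show p + (j - p) = j by omega] at this
  exact this

theorem pvPrefix_lt {cs : List Char} {pos : Nat} (h : pvKeyL.isPrefixOf (cs.drop pos) = true) :
    pos < cs.length := by
  by_contra hc
  rw [List.drop_eq_nil_iff.mpr (by omega)] at h
  simp [pvKeyL] at h

theorem pvNlEnd_bounds {cs : List Char} {pos : Nat} (h : pvKeyL.isPrefixOf (cs.drop pos) = true) :
    pos < pvNlEnd cs pos ∧ pvNlEnd cs pos ≤ cs.length := by
  have hlt := pvPrefix_lt h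
  unfold pvNlEnd
  rcases hf : pvFind cs ['\n'] pos with _ | x
  · exact ⟨hlt, le_rfl⟩
  · obtain ⟨h1, h2, -⟩ := pvFind_some hf
    have hx : pos ≠ x := by
      intro he
      subst he
      rcases hd : cs.drop pos with _ | ⟨c, r⟩
      · rw [hd] at h; simp [pvKeyL] at h
      · rw [hd] at h h2
        simp [pvKeyL, List.isPrefixOf] at h h2
        exact absurd (h2.trans h.1.symm) (by decide)
    have hxlen : x < cs.length := by
      by_contra hc
      rw [List.drop_eq_nil_iff.mpr (by omega)] at h2
      simp at h2
    exact ⟨show pos < x by omega, show x ≤ cs.length by omega⟩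

-- The loop: pos = content.find(key, p); while pos != -1: … ; pos = content.find(key, end).
def pvAltLoop (cs : List Char) (last p : Nat) (acc : List Char) : List Char :=
  match h : pvFind cs pvKeyL p with
  | none => acc ++ cs.drop last                       -- pieces.append(content[last:])
  | some pos =>
    let start := pvLineStart cs pos                   -- content.rfind("\n", 0, pos) + 1
    let e := pvNlEnd cs pos                           -- content.find("\n", pos) (or len)
    let line := (cs.drop start).take (e - start)      -- content[start:end]
    let piece := if PySem.Chars.startswith (PySem.Chars.lstrip line) pvKeyL then
        "# ".toList ++ line ++ pvSufL
      else line
    -- pieces.append(content[last:start]); pieces.append(piece); last = end; pos = find(key, end)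
    pvAltLoop cs e e (acc ++ (cs.drop last).take (start - last) ++ piece)
termination_by cs.length + 1 - p
decreasing_by
  obtain ⟨h1, h2, _⟩ := pvFind_some h
  obtain ⟨h3, h4⟩ := pvNlEnd_bounds h2
  have := pvPrefix_lt h2
  omega

def comment_out_api_key_py_alt (content : String) : String :=
  String.ofList (pvAltLoop content.toList 0 0 [])

-- ===== PRECONDITION & SPEC =====
def Spec_comment_out_api_key_py (content : String) (out : String) : Prop := out = comment_out_api_key_py_alt content
instance (content : String) (out : String) : Decidable (Spec_comment_out_api_key_py content out) := by unfold Spec_comment_out_api_key_py; infer_instance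

-- ===== CLAIM (what is proved, stated in full; the proofs are below) =====
def Claim_equal_comment_out_api_key_py : Prop := ∀ (content : String), Dom_comment_out_api_key_py content → Spec_comment_out_api_key_py content (comment_out_api_key_py content)

-- ===== LEMMAS AND PROOFS =====

theorem pvFind_none {cs sub : List Char} {p : Nat} (h : pvFind cs sub p = none) :
    ∀ j, p ≤ j → sub.isPrefixOf (cs.drop j) = false := by
  intro j hj
  rcases hn : pvFindAux sub (cs.drop p) with _ | i
  · -- none: show prefix false everywhere by induction on the suffix
    clear h
    have : ∀ (l : List Char), pvFindAux sub l = none → ∀ k, sub.isPrefixOf (l.drop k) = false := by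
      intro l
      induction l with
      | nil =>
        intro hh k
        unfold pvFindAux at hh
        split at hh
        · cases hh
        · simpa using Bool.eq_false_iff.mpr ‹_›
      | cons c t ih =>
        intro hh k
        unfold pvFindAux at hh
        split at hh
        · cases hh
        · rename_i hnp
          have ht : pvFindAux sub t = none := by
            rcases hx : pvFindAux sub t with _ | _
            · rfl
            · rw [hx] at hh; simp at hh
          match k with
          | 0 => simpa using Bool.eq_false_iff.mpr hnp
          | k + 1 => simpa using ih ht k
    have := this _ hn (j - p)
    rw [List.drop_drop, show p + (j - p) = j by omega] at this
    exact this
  · exfalso; unfold pvFind at h; rw [hn] at h; simp at h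


-- A's per-line transform, factored out of its loop body.
def pvFixA (line : List Char) : List Char :=
  let stripped := PySem.Chars.strip line
  if PySem.Chars.startswith stripped "ANTHROPIC_API_KEY=".toList
      && !(PySem.Chars.startswith stripped "#".toList) then
    "# ".toList ++ line ++ "  # Disabled for Claude Code subscription mode".toList
  else line

-- Reference form of Python's split("\n"): accumulate the current line in `pre`.
def pvSplitAux (pre : List Char) : List Char → List (List Char)
  | [] => [pre]
  | c :: rest => if c = '\n' then pre :: pvSplitAux [] rest else pvSplitAux (pre ++ [c]) rest

-- The common rendering both programs produce.
def pvJ (u : List Char) : List Char :=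
  PySem.Chars.join ['\n'] ((pvSplitAux [] u).map pvFixA)

theorem pvFoldA (l : List (List Char)) (init : List (List Char)) :
    l.foldl (fun acc line =>
      let stripped := PySem.Chars.strip line
      if PySem.Chars.startswith stripped "ANTHROPIC_API_KEY=".toList
          && !(PySem.Chars.startswith stripped "#".toList) then
        acc ++ ["# ".toList ++ line ++ "  # Disabled for Claude Code subscription mode".toList]
      else acc ++ [line]) init = init ++ l.map pvFixA := by
  induction l generalizing init with
  | nil => simp
  | cons x xs ih =>
    simp only [List.foldl_cons, List.map_cons]
    rw [ih]
    simp only [pvFixA]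
    split <;> simp

theorem pvGoSplit (l : List Char) : ∀ (fuel : Nat) (cur : List Char) (acc : List (List Char)),
    l.length < fuel →
    PySem.Chars.splitOn.go ['\n'] fuel l cur acc = acc.reverse ++ pvSplitAux cur.reverse l := by
  induction l with
  | nil =>
    intro fuel cur acc h
    match fuel with
    | fuel + 1 => simp [PySem.Chars.splitOn.go, pvSplitAux]
  | cons c rest ih =>
    intro fuel cur acc h
    simp only [List.length_cons] at h
    match fuel with
    | fuel + 1 =>
      rw [PySem.Chars.splitOn.go]
      by_cases hc : c = '\n'
      · subst hc
        rw [if_pos (by simp [List.isPrefixOf])]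
        rw [show List.drop ['\n'].length ('\n' :: rest) = rest from rfl]
        rw [ih fuel [] (cur.reverse :: acc) (by omega)]
        simp [pvSplitAux]
      · rw [if_neg (by simp [List.isPrefixOf]; exact fun hh => absurd hh.symm hc)]
        rw [ih fuel (c :: cur) acc (by omega)]
        simp [pvSplitAux, hc]


-- ---- per-line equivalence of the tests (strip vs lstrip; '#' test redundant) ----

theorem pvRstrip_prefix (x : List Char) : PySem.Chars.rstrip x <+: x := by
  unfold PySem.Chars.rstrip
  have h := (List.dropWhile_suffix (l := x.reverse) PySem.Chars.isspace).reverse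
  simpa using h

theorem pvKey_rstrip (x : List Char) :
    List.isPrefixOf "ANTHROPIC_API_KEY=".toList (PySem.Chars.rstrip x)
      = List.isPrefixOf "ANTHROPIC_API_KEY=".toList x := by
  rw [Bool.eq_iff_iff, List.isPrefixOf_iff_prefix, List.isPrefixOf_iff_prefix]
  constructor
  · intro hpre
    exact hpre.trans (pvRstrip_prefix x)
  · intro hpre
    obtain ⟨t, ht⟩ := hpre
    subst ht
    unfold PySem.Chars.rstrip
    rw [List.reverse_append, List.dropWhile_append]
    by_cases he : (List.dropWhile PySem.Chars.isspace t.reverse).isEmpty = true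
    · rw [if_pos he]
      rw [show List.dropWhile PySem.Chars.isspace ("ANTHROPIC_API_KEY=".toList).reverse
          = ("ANTHROPIC_API_KEY=".toList).reverse from by decide]
      rw [List.reverse_reverse]
    · rw [if_neg he]
      rw [List.reverse_append, List.reverse_reverse]
      exact ⟨_, rfl⟩

theorem pvHash_false (y : List Char)
    (h : List.isPrefixOf "ANTHROPIC_API_KEY=".toList y = true) :
    List.isPrefixOf "#".toList y = false := by
  rw [List.isPrefixOf_iff_prefix] at h
  obtain ⟨t, ht⟩ := h
  subst ht
  rw [show ("ANTHROPIC_API_KEY=".toList) = 'A' :: "NTHROPIC_API_KEY=".toList from rfl]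
  simp [List.isPrefixOf]

-- B's branch on a line equals A's per-line transform.
theorem pvLineB_eq (line : List Char) :
    (if PySem.Chars.startswith (PySem.Chars.lstrip line) pvKeyL then
      "# ".toList ++ line ++ pvSufL else line) = pvFixA line := by
  simp only [pvFixA, pvKeyL, pvSufL, PySem.Chars.strip, PySem.Chars.lstrip, PySem.Chars.startswith]
  rcases h : List.isPrefixOf "ANTHROPIC_API_KEY=".toList
      (List.dropWhile PySem.Chars.isspace line) with _ | _
  · have ha : List.isPrefixOf "ANTHROPIC_API_KEY=".toList
        (PySem.Chars.rstrip (List.dropWhile PySem.Chars.isspace line)) = false := by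
      rw [pvKey_rstrip]; exact h
    simp only [ha]
    simp
  · have ha : List.isPrefixOf "ANTHROPIC_API_KEY=".toList
        (PySem.Chars.rstrip (List.dropWhile PySem.Chars.isspace line)) = true := by
      rw [pvKey_rstrip]; exact h
    have hh := pvHash_false _ ha
    simp only [ha, hh]
    simp

-- ---- split / join toolkit ----

theorem pvSplitAux_ne (u : List Char) : ∀ pre, pvSplitAux pre u ≠ [] := by
  induction u with
  | nil => intro pre; simp [pvSplitAux]
  | cons c t ih =>
    intro pre
    by_cases hc : c = '\n' <;> simp [pvSplitAux, hc, ih]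

theorem pvJoinCons (a b : List Char) (t : List (List Char)) :
    PySem.Chars.join ['\n'] (a :: b :: t) = a ++ '\n' :: PySem.Chars.join ['\n'] (b :: t) := by
  simp [PySem.Chars.join, List.intercalate]

theorem pvJoinSingle (a : List Char) : PySem.Chars.join ['\n'] [a] = a := by
  simp [PySem.Chars.join, List.intercalate]

theorem pvJoinAppend (Y : List (List Char)) (hY : Y ≠ []) : ∀ (X : List (List Char)), X ≠ [] →
    PySem.Chars.join ['\n'] (X ++ Y)
      = PySem.Chars.join ['\n'] X ++ '\n' :: PySem.Chars.join ['\n'] Y := by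
  intro X
  induction X with
  | nil => intro h; exact absurd rfl h
  | cons a X ih =>
    intro _
    cases X with
    | nil =>
      cases Y with
      | nil => exact absurd rfl hY
      | cons b t => rw [List.singleton_append, pvJoinCons, pvJoinSingle]
    | cons a' X' =>
      rw [show (a :: a' :: X') ++ Y = a :: a' :: (X' ++ Y) from by simp, pvJoinCons,
        show a' :: (X' ++ Y) = (a' :: X') ++ Y from by simp, ih (by simp), pvJoinCons]
      simp

theorem pvSplitCat (x : List Char) : ∀ (pre y : List Char),
    pvSplitAux pre (x ++ '\n' :: y) = pvSplitAux pre x ++ pvSplitAux [] y := by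
  induction x with
  | nil => intro pre y; simp [pvSplitAux]
  | cons c t ih =>
    intro pre y
    by_cases hc : c = '\n' <;> simp [pvSplitAux, hc, ih]

theorem pvSplitNoNl (u : List Char) (h : '\n' ∉ u) : ∀ pre, pvSplitAux pre u = [pre ++ u] := by
  induction u with
  | nil => intro pre; simp [pvSplitAux]
  | cons c t ih =>
    intro pre
    have hc : c ≠ '\n' := fun he => h (he ▸ List.mem_cons_self ..)
    have ht : '\n' ∉ t := fun hm => h (List.mem_cons_of_mem _ hm)
    rw [show pvSplitAux pre (c :: t) = pvSplitAux (pre ++ [c]) t by simp [pvSplitAux, hc]]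
    rw [ih ht]
    simp

theorem pvJoinSplit (u : List Char) : ∀ pre, PySem.Chars.join ['\n'] (pvSplitAux pre u) = pre ++ u := by
  induction u with
  | nil => intro pre; simp [pvSplitAux, pvJoinSingle]
  | cons c t ih =>
    intro pre
    by_cases hc : c = '\n'
    · subst hc
      rw [show pvSplitAux pre ('\n' :: t) = pre :: pvSplitAux [] t by simp [pvSplitAux]]
      rcases hsp : pvSplitAux [] t with _ | ⟨b, tl⟩
      · exact absurd hsp (pvSplitAux_ne t [])
      · rw [pvJoinCons, ← hsp, ih]
        simp
    · rw [show pvSplitAux pre (c :: t) = pvSplitAux (pre ++ [c]) t by simp [pvSplitAux, hc]]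
      rw [ih (pre ++ [c])]
      simp

theorem pvSplitInfix (u : List Char) : ∀ (pre m : List Char), m ∈ pvSplitAux pre u →
    ∃ s t, pre ++ u = s ++ m ++ t := by
  induction u with
  | nil =>
    intro pre m hm
    simp [pvSplitAux] at hm
    subst hm
    exact ⟨[], [], by simp⟩
  | cons c rest ih =>
    intro pre m hm
    by_cases hc : c = '\n'
    · subst hc
      rw [show pvSplitAux pre ('\n' :: rest) = pre :: pvSplitAux [] rest by simp [pvSplitAux]] at hm
      rcases List.mem_cons.mp hm with rfl | hm
      · exact ⟨[], '\n' :: rest, by simp⟩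
      · obtain ⟨s, t, hst⟩ := ih [] m hm
        simp only [List.nil_append] at hst
        exact ⟨pre ++ '\n' :: s, t, by rw [hst]; simp⟩
    · rw [show pvSplitAux pre (c :: rest) = pvSplitAux (pre ++ [c]) rest by simp [pvSplitAux, hc]] at hm
      obtain ⟨s, t, hst⟩ := ih (pre ++ [c]) m hm
      exact ⟨s, t, by rw [← hst]; simp⟩

-- ---- unchanged regions ----

theorem pvPrefix_ext {k x y : List Char} (h : k.isPrefixOf x = true) :
    k.isPrefixOf (x ++ y) = true := by
  rw [List.isPrefixOf_iff_prefix] at *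
  exact h.trans (List.prefix_append ..)

theorem pvPrefix_of_take {k x : List Char} {q : Nat} (h : k.isPrefixOf (x.take q) = true) :
    k.isPrefixOf x = true := by
  rw [List.isPrefixOf_iff_prefix] at *
  exact h.trans (List.take_prefix ..)

theorem pvKey_not_nil : pvKeyL.isPrefixOf ([] : List Char) = false := by decide

-- drop past the counted whitespace = dropWhile.
theorem pvDrop_takeWhile (p : Char → Bool) (l : List Char) :
    l.drop (l.takeWhile p).length = l.dropWhile p := by
  have h := List.takeWhile_append_dropWhile (p := p) (l := l)
  nth_rewrite 2 [← h]
  rw [List.drop_left]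

theorem pvFixA_ne_imp (m : List Char) (h : pvFixA m ≠ m) :
    ∃ k, pvKeyL.isPrefixOf (m.drop k) = true := by
  unfold pvFixA at h
  simp only [PySem.Chars.strip, PySem.Chars.lstrip, PySem.Chars.startswith] at h
  split at h
  · rename_i hcond
    have h1 : List.isPrefixOf "ANTHROPIC_API_KEY=".toList
        (PySem.Chars.rstrip (List.dropWhile PySem.Chars.isspace m)) = true :=
      (Bool.and_eq_true_iff.mp hcond).1
    rw [pvKey_rstrip] at h1
    refine ⟨(m.takeWhile PySem.Chars.isspace).length, ?_⟩
    rw [pvDrop_takeWhile]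
    exact h1
  · exact absurd rfl h

theorem pvNoOccSeg {u : List Char} (hno : ∀ j, pvKeyL.isPrefixOf (u.drop j) = false)
    {m : List Char} (hm : m ∈ pvSplitAux [] u) : pvFixA m = m := by
  by_contra hne
  obtain ⟨k, hk⟩ := pvFixA_ne_imp m hne
  obtain ⟨s, t, hst⟩ := pvSplitInfix u [] m hm
  simp only [List.nil_append] at hst
  have hkm : k < m.length := by
    by_contra hc
    rw [List.drop_eq_nil_iff.mpr (by omega)] at hk
    rw [pvKey_not_nil] at hk
    cases hk
  have hfin : pvKeyL.isPrefixOf (u.drop (s.length + k)) = true := by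
    rw [hst, List.append_assoc]
    rw [show (s ++ (m ++ t)).drop (s.length + k) = ((s ++ (m ++ t)).drop s.length).drop k by
      rw [List.drop_drop]]
    rw [List.drop_left]
    rw [List.drop_append_of_le_length (by omega)]
    exact pvPrefix_ext hk
  rw [hno _] at hfin
  cases hfin

theorem pvMapFixId {u : List Char} (hno : ∀ j, pvKeyL.isPrefixOf (u.drop j) = false) :
    (pvSplitAux [] u).map pvFixA = pvSplitAux [] u := by
  rw [List.map_congr_left (fun m hm => pvNoOccSeg hno hm)]
  exact List.map_id _

theorem pvJ_nil : pvJ [] = [] := by decide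

-- ---- index geometry of the patched line ----

theorem pvSegSplit (cs : List Char) {a b : Nat} (hab : a ≤ b) :
    cs.drop a = (cs.drop a).take (b - a) ++ cs.drop b := by
  conv_lhs => rw [← List.take_append_drop (b - a) (cs.drop a)]
  congr 1
  rw [List.drop_drop]
  congr 1
  omega

theorem pvDropWhile_head (p : Char → Bool) : ∀ (l : List Char) {c : Char} {r : List Char},
    l.dropWhile p = c :: r → p c = false := by
  intro l
  induction l with
  | nil => intro c r h; simp [List.dropWhile] at h
  | cons a t ih =>
    intro c r h
    rw [List.dropWhile_cons] at h
    split at h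
    · exact ih h
    · cases h; exact Bool.eq_false_iff.mpr ‹_›

theorem pvTakeWhileBound (p : Char → Bool) (c : Char) (hc : p c = false) :
    ∀ (x y : List Char), (List.takeWhile p (x ++ c :: y)).length ≤ x.length := by
  intro x
  induction x with
  | nil => intro y; simp [List.takeWhile_cons, hc]
  | cons a t ih =>
    intro y
    by_cases ha : p a <;> simp [List.takeWhile_cons, ha]
    exact ih y

theorem pvNoNlTake : ∀ (u : List Char) (n : Nat),
    (∀ j, j < n → (['\n'] : List Char).isPrefixOf (u.drop j) = false) →
    ∀ c ∈ u.take n, c ≠ '\n' := by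
  intro u
  induction u with
  | nil => intro n h c hc; simp at hc
  | cons a t ih =>
    intro n h c hc
    match n with
    | 0 => simp at hc
    | n + 1 =>
      rw [List.take_succ_cons] at hc
      rcases List.mem_cons.mp hc with rfl | hc
      · have h0 := h 0 (by omega)
        simp [List.isPrefixOf] at h0
        exact fun he => h0 (by rw [he])
      · exact ih n (fun j hj => by simpa using h (j + 1) (by omega)) c hc

theorem pvLineStart_decomp (cs : List Char) (pos : Nat) (hpos : pos ≤ cs.length) :
    pvLineStart cs pos ≤ pos ∧
    cs.take pos = cs.take (pvLineStart cs pos) ++ ((cs.take pos).reverse.takeWhile (· != '\n')).reverse ∧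
    (∀ c ∈ ((cs.take pos).reverse.takeWhile (· != '\n')).reverse, c ≠ '\n') ∧
    (pvLineStart cs pos = 0 ∨ ∃ B, cs.take (pvLineStart cs pos) = B ++ ['\n']) := by
  set W := (cs.take pos).reverse.takeWhile (· != '\n') with hW
  set A := ((cs.take pos).reverse.dropWhile (· != '\n')).reverse with hA
  have hul : (cs.take pos).length = pos := by rw [List.length_take]; omega
  have ht : W.length ≤ pos := by
    have h := List.takeWhile_append_dropWhile (p := (· != '\n')) (l := (cs.take pos).reverse)
    have h2 := congrArg List.length h
    simp only [List.length_append, List.length_reverse] at h2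
    rw [hul, ← hW] at h2
    omega
  have hstart : pvLineStart cs pos = pos - W.length := rfl
  have hsplit : cs.take pos = A ++ W.reverse := by
    rw [hA, hW]
    conv_lhs => rw [← List.reverse_reverse (cs.take pos),
      ← List.takeWhile_append_dropWhile (p := (· != '\n')) (l := (cs.take pos).reverse)]
    rw [List.reverse_append]
  have hAlen : A.length = pos - W.length := by
    have h2 := congrArg List.length hsplit
    simp only [List.length_append, List.length_reverse] at h2
    rw [hul] at h2
    omega
  have htake : cs.take (pvLineStart cs pos) = A := by
    rw [hstart, ← hAlen]
    rw [show cs.take A.length = (cs.take pos).take A.length from by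
      rw [List.take_take]; congr 1; omega]
    rw [hsplit]
    exact List.take_left ..
  refine ⟨by omega, ?_, ?_, ?_⟩
  · rw [htake]; exact hsplit
  · intro c hc
    have hc' : c ∈ W := by simpa using hc
    rw [hW] at hc'
    have := List.mem_takeWhile_imp hc'
    simpa using this
  · rcases hd : (cs.take pos).reverse.dropWhile (· != '\n') with _ | ⟨c, r⟩
    · left
      have hAnil : A = [] := by rw [hA, hd]; rfl
      rw [hAnil] at hAlen
      simp at hAlen
      rw [hstart]
      omega
    · right
      have hcnl : c = '\n' := by
        have := pvDropWhile_head (· != '\n') _ hd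
        simpa using this
      refine ⟨r.reverse, ?_⟩
      rw [htake, hA, hd, hcnl]
      simp

theorem pvLineStart_gt (cs : List Char) (last pos : Nat)
    (hhead : (cs.drop last).head? = some '\n') (hlt : last < pos) (hpos : pos ≤ cs.length) :
    last < pvLineStart cs pos := by
  obtain ⟨w, hwd⟩ : ∃ w, cs.drop last = '\n' :: w := by
    rcases hd : cs.drop last with _ | ⟨c, r⟩
    · rw [hd] at hhead; simp at hhead
    · rw [hd] at hhead; simp at hhead; exact ⟨r, by rw [hhead]⟩
  have hmid : cs.take pos = cs.take last ++ '\n' :: w.take (pos - last - 1) := by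
    have h1 : cs.take pos = cs.take last ++ (cs.drop last).take (pos - last) := by
      rw [← List.take_add]
      congr 1
      omega
    rw [h1, hwd]
    congr 1
    obtain ⟨k, hk⟩ : ∃ k, pos - last = k + 1 := ⟨pos - last - 1, by omega⟩
    rw [hk, List.take_succ_cons]
    congr 2
  have hbnd : ((cs.take pos).reverse.takeWhile (· != '\n')).length ≤ pos - last - 1 := by
    rw [hmid]
    rw [show (cs.take last ++ '\n' :: w.take (pos - last - 1)).reverse
        = (w.take (pos - last - 1)).reverse ++ '\n' :: (cs.take last).reverse from by
      rw [List.reverse_append, List.reverse_cons]; simp]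
    have h1 := pvTakeWhileBound (· != '\n') '\n' (by simp)
      ((w.take (pos - last - 1)).reverse) ((cs.take last).reverse)
    have h2 : (w.take (pos - last - 1)).length ≤ pos - last - 1 := by simp
    rw [List.length_reverse] at h1
    omega
  unfold pvLineStart
  omega


-- ---- the newline search ----

theorem pvNlEnd_min (cs : List Char) (pos : Nat) :
    ∀ j, pos ≤ j → j < pvNlEnd cs pos → (['\n'] : List Char).isPrefixOf (cs.drop j) = false := by
  intro j h1 h2
  unfold pvNlEnd at h2
  rcases hf : pvFind cs ['\n'] pos with _ | x
  · exact pvFind_none hf j h1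
  · rw [hf] at h2
    exact (pvFind_some hf).2.2 j h1 h2

theorem pvNlEnd_boundary (cs : List Char) (pos : Nat) :
    cs.drop (pvNlEnd cs pos) = [] ∨ ∃ r, cs.drop (pvNlEnd cs pos) = '\n' :: r := by
  unfold pvNlEnd
  rcases hf : pvFind cs ['\n'] pos with _ | x
  · left
    simp
  · obtain ⟨-, h2, -⟩ := pvFind_some hf
    rcases hd : cs.drop x with _ | ⟨c, r⟩
    · rw [hd] at h2; simp [List.isPrefixOf] at h2
    · right
      rw [hd] at h2
      simp [List.isPrefixOf] at h2
      exact ⟨r, by cases h2; rfl⟩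

-- ---- rendering one processed chunk ----

theorem pvJ_cons_nl (r : List Char) :
    pvJ ('\n' :: r) = '\n' :: PySem.Chars.join ['\n'] ((pvSplitAux [] r).map pvFixA) := by
  unfold pvJ
  rw [show pvSplitAux [] ('\n' :: r) = [] :: pvSplitAux [] r from by simp [pvSplitAux]]
  rcases hsp : pvSplitAux [] r with _ | ⟨b, tl⟩
  · exact absurd hsp (pvSplitAux_ne r [])
  · rw [List.map_cons, List.map_cons, pvJoinCons,
      show pvFixA [] = [] from by decide, List.nil_append]

theorem pvRender (Bp L R : List Char)
    (hBpshape : Bp = [] ∨ ∃ B', Bp = B' ++ ['\n'])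
    (hnoOccBp : ∀ j, pvKeyL.isPrefixOf (Bp.drop j) = false)
    (hLnl : '\n' ∉ L)
    (hR : R = [] ∨ ∃ r, R = '\n' :: r) :
    pvJ (Bp ++ L ++ R) = Bp ++ pvFixA L ++ pvJ R := by
  have core : PySem.Chars.join ['\n'] ((pvSplitAux [] (L ++ R)).map pvFixA)
      = pvFixA L ++ pvJ R := by
    rcases hR with rfl | ⟨r, rfl⟩
    · rw [List.append_nil, pvSplitNoNl L hLnl []]
      simp only [List.nil_append, List.map_cons, List.map_nil]
      rw [pvJoinSingle, pvJ_nil, List.append_nil]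
    · rw [pvSplitCat L [] r, pvSplitNoNl L hLnl [], pvJ_cons_nl]
      simp only [List.nil_append]
      rcases hsp : pvSplitAux [] r with _ | ⟨b, tl⟩
      · exact absurd hsp (pvSplitAux_ne r [])
      · simp only [List.nil_append, List.singleton_append, List.map_cons]
        rw [pvJoinCons]
  rcases hBpshape with rfl | ⟨B', rfl⟩
  · simpa [pvJ] using core
  · have hnoB' : ∀ j, pvKeyL.isPrefixOf (B'.drop j) = false := by
      intro j
      by_cases hj : j ≤ B'.length
      · rcases hx : pvKeyL.isPrefixOf (B'.drop j) with _ | _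
        · rfl
        · exfalso
          have hext := pvPrefix_ext (y := ['\n']) hx
          have := hnoOccBp j
          rw [List.drop_append_of_le_length hj, hext] at this
          cases this
      · rw [List.drop_eq_nil_iff.mpr (by omega), pvKey_not_nil]
    have hYne : (pvSplitAux [] (L ++ R)).map pvFixA ≠ [] := by
      intro h
      exact pvSplitAux_ne (L ++ R) [] (List.map_eq_nil_iff.mp h)
    unfold pvJ
    rw [show (B' ++ ['\n']) ++ L ++ R = B' ++ '\n' :: (L ++ R) from by simp,
      pvSplitCat B' [] (L ++ R), List.map_append, pvMapFixId hnoB',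
      pvJoinAppend ((pvSplitAux [] (L ++ R)).map pvFixA) hYne (pvSplitAux [] B') (pvSplitAux_ne B' []),
      pvJoinSplit B' [], core]
    simp [pvJ]

-- ---- the main step: one loop iteration renders one chunk ----

theorem pvStep (cs : List Char) (last pos : Nat)
    (hb : last = 0 ∨ (cs.drop last).head? = some '\n')
    (hfind : pvFind cs pvKeyL last = some pos) :
    pvJ (cs.drop last) =
      (cs.drop last).take (pvLineStart cs pos - last) ++
      pvFixA ((cs.drop (pvLineStart cs pos)).take (pvNlEnd cs pos - pvLineStart cs pos)) ++
      pvJ (cs.drop (pvNlEnd cs pos)) := by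
  obtain ⟨hp1, hp2, hp3⟩ := pvFind_some hfind
  have hposlen : pos < cs.length := pvPrefix_lt hp2
  obtain ⟨hE1, hE2⟩ := pvNlEnd_bounds hp2
  obtain ⟨hsp, htk, hleadnl, hbound⟩ := pvLineStart_decomp cs pos (by omega)
  have hlaststart : last ≤ pvLineStart cs pos := by
    rcases hb with h0 | hh
    · omega
    · have hlp : last < pos := by
        rcases Nat.lt_or_ge last pos with h | h
        · exact h
        · exfalso
          have heq : pos = last := by omega
          subst heq
          rcases hd : cs.drop pos with _ | ⟨c, r⟩
          · rw [hd] at hp2; exact absurd hp2 (by decide)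
          · rw [hd] at hp2 hh
            simp at hh
            rw [show pvKeyL = 'A' :: "NTHROPIC_API_KEY=".toList from rfl] at hp2
            simp [List.isPrefixOf] at hp2
            rw [← hp2.1] at hh
            exact absurd hh (by decide)
      exact le_of_lt (pvLineStart_gt cs last pos hh hlp (by omega))
  set start := pvLineStart cs pos with hstartdef
  set e := pvNlEnd cs pos with hedef
  set lead := ((cs.take pos).reverse.takeWhile (· != '\n')).reverse with hleaddef
  have hleadlen : lead.length = pos - start := by
    have h2 := congrArg List.length htk
    simp only [List.length_append] at h2
    rw [List.length_take, List.length_take] at h2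
    omega
  have hdropstart : cs.drop start = lead ++ cs.drop pos := by
    conv_lhs => rw [show cs = cs.take pos ++ cs.drop pos from (List.take_append_drop pos cs).symm]
    rw [htk, List.append_assoc]
    rw [List.drop_append_of_le_length (by rw [List.length_take]; omega)]
    rw [List.drop_eq_nil_iff.mpr (by rw [List.length_take]; omega)]
    simp
  have hL : (cs.drop start).take (e - start) = lead ++ (cs.drop pos).take (e - pos) := by
    rw [hdropstart, List.take_append]
    rw [List.take_of_length_le (by omega)]
    rw [show e - start - lead.length = e - pos from by omega]
  set L := (cs.drop start).take (e - start) with hLdef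
  have hLnl : '\n' ∉ L := by
    rw [hL]
    intro hmem
    rcases List.mem_append.mp hmem with hm | hm
    · exact hleadnl _ hm rfl
    · refine pvNoNlTake (cs.drop pos) (e - pos) ?_ _ hm rfl
      intro j hj
      have hmin := pvNlEnd_min cs pos (pos + j) (by omega) (by omega)
      rw [List.drop_drop]
      exact hmin
  have hBL : cs.drop last = (cs.drop last).take (start - last) ++ (L ++ cs.drop e) := by
    have h1 := pvSegSplit cs (a := last) (b := start) hlaststart
    have h2 := pvSegSplit cs (a := start) (b := e) (by omega)
    conv_lhs => rw [h1, h2]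
  have hBpshape : (cs.drop last).take (start - last) = [] ∨
      ∃ B', (cs.drop last).take (start - last) = B' ++ ['\n'] := by
    rcases Nat.eq_or_lt_of_le hlaststart with heq | hlt2
    · left; rw [← heq]; simp
    · rcases hbound with h0 | ⟨B, hB⟩
      · omega
      · right
        have hBlen : B.length = start - 1 := by
          have hc := congrArg List.length hB
          rw [List.length_take] at hc
          simp at hc
          omega
        refine ⟨B.drop last, ?_⟩
        rw [show (cs.drop last).take (start - last) = (cs.take start).drop last from by
          rw [List.drop_take]]
        rw [hB, List.drop_append_of_le_length (by omega)]
  have hnoOccBp : ∀ j, pvKeyL.isPrefixOf (((cs.drop last).take (start - last)).drop j) = false := by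
    intro j
    by_cases hj : j < ((cs.drop last).take (start - last)).length
    · have hjlen : ((cs.drop last).take (start - last)).length ≤ start - last := by
        rw [List.length_take]; omega
      rcases hx : pvKeyL.isPrefixOf (((cs.drop last).take (start - last)).drop j) with _ | _
      · rfl
      · exfalso
        rw [List.drop_take] at hx
        have hx2 := pvPrefix_of_take hx
        rw [List.drop_drop] at hx2
        have hmin := hp3 (last + j) (by omega) (by omega)
        rw [hmin] at hx2
        cases hx2
    · rw [List.drop_eq_nil_iff.mpr (by omega), pvKey_not_nil]
  have hrender := pvRender ((cs.drop last).take (start - last)) L (cs.drop e)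
    hBpshape hnoOccBp hLnl (by rw [hedef]; exact pvNlEnd_boundary cs pos)
  conv_lhs => rw [show cs.drop last = (cs.drop last).take (start - last) ++ L ++ cs.drop e from by
    rw [List.append_assoc]; exact hBL]
  exact hrender

-- ---- the loop computes the rendering ----

theorem pvLoop : ∀ (n : Nat) (cs : List Char) (last : Nat) (acc : List Char),
    cs.length - last ≤ n →
    (last = 0 ∨ last = cs.length ∨ (cs.drop last).head? = some '\n') →
    pvAltLoop cs last last acc = acc ++ pvJ (cs.drop last) := by
  intro n
  induction n with
  | zero =>
    intro cs last acc hn hb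
    have hd : cs.drop last = [] := List.drop_eq_nil_iff.mpr (by omega)
    have h0 : pvFindAux pvKeyL ([] : List Char) = none := by decide
    have hnone : pvFind cs pvKeyL last = none := by
      unfold pvFind
      rw [hd, h0]
      rfl
    rw [pvAltLoop]
    split
    · rw [hd, pvJ_nil]
    · rename_i pos hf
      rw [hnone] at hf
      cases hf
  | succ n ih =>
    intro cs last acc hn hb
    rw [pvAltLoop]
    split
    · rename_i hf
      have hno : ∀ j, pvKeyL.isPrefixOf ((cs.drop last).drop j) = false := by
        intro j
        rw [List.drop_drop]
        exact pvFind_none hf (last + j) (by omega)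
      unfold pvJ
      rw [pvMapFixId hno, pvJoinSplit]
      simp
    · rename_i pos hf
      obtain ⟨hp1, hp2, hp3⟩ := pvFind_some hf
      have hposlen : pos < cs.length := pvPrefix_lt hp2
      obtain ⟨hE1, hE2⟩ := pvNlEnd_bounds hp2
      have hb' : last = 0 ∨ (cs.drop last).head? = some '\n' := by
        rcases hb with h | h | h
        · exact Or.inl h
        · omega
        · exact Or.inr h
      show pvAltLoop cs (pvNlEnd cs pos) (pvNlEnd cs pos)
          (acc ++ (cs.drop last).take (pvLineStart cs pos - last) ++
            (if PySem.Chars.startswith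
                (PySem.Chars.lstrip ((cs.drop (pvLineStart cs pos)).take (pvNlEnd cs pos - pvLineStart cs pos)))
                pvKeyL then
              "# ".toList ++ ((cs.drop (pvLineStart cs pos)).take (pvNlEnd cs pos - pvLineStart cs pos)) ++ pvSufL
            else ((cs.drop (pvLineStart cs pos)).take (pvNlEnd cs pos - pvLineStart cs pos))))
          = acc ++ pvJ (cs.drop last)
      rw [pvLineB_eq]
      rw [ih cs (pvNlEnd cs pos) _ (by omega) (by
        rcases pvNlEnd_boundary cs pos with h | ⟨r, h⟩
        · right; left
          have hlen := congrArg List.length h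
          simp [List.length_drop] at hlen
          omega
        · right; right
          rw [h]
          rfl)]
      rw [pvStep cs last pos hb' hf]
      simp [List.append_assoc]

-- ===== VERDICT (by name: the statement is the Claim_ definition above) =====
theorem comment_out_api_key_py_spec : Claim_equal_comment_out_api_key_py := by
  intro content _
  unfold Spec_comment_out_api_key_py comment_out_api_key_py comment_out_api_key_py_alt
  simp only []
  rw [pvFoldA]
  simp only [List.nil_append]
  congr 1
  rw [show ("\n".toList) = ['\n'] from rfl]
  unfold PySem.Chars.splitOn
  rw [pvGoSplit _ _ _ _ (by omega)]
  simp only [List.reverse_nil, List.nil_append]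
  rw [pvLoop content.toList.length content.toList 0 [] (by omega) (Or.inl rfl)]
  rw [List.drop_zero, List.nil_append]
  rfl
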